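-- pv_equiv track=rewrite | github.com/0-0Jay/algorithm | Algorithm_GroupStudy/프로그래머스/maxPresent.py | solution
-- ===== SOURCE A (Python) =====
-- def solution(friends, gifts):
--     dict = {}
--     for a in friends:
--         dict[a] = {'sum' : 0, 'cnt' : 0}
--         for b in friends:
--             if a == b: continue
--             dict[a][b] = 0
--
--     for gi in gifts:
--         a, b = gi.split(' ')
--         dict[a][b] += 1
--         dict[a]['sum'] += 1
--         dict[b]['sum'] -= 1
--     sz = len(friends)
--     max_cnt = 0
--     for i in range(sz):
--         for j in range(i + 1, sz):
--             a = friends[i]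
--             b = friends[j]
--             if dict[a][b] > dict[b][a]: dict[a]['cnt'] += 1
--             elif dict[a][b] < dict[b][a]: dict[b]['cnt'] += 1
--             elif dict[a]['sum'] > dict[b]['sum']: dict[a]['cnt'] += 1
--             elif dict[a]['sum'] < dict[b]['sum']: dict[b]['cnt'] += 1
--             max_cnt = max(max_cnt, dict[a]['cnt'], dict[b]['cnt'])
--
--     return max_cnt
-- ===== SOURCE B (Python) =====
-- def solution(friends, gifts):
--     give = {}
--     net = {a: 0 for a in friends}
--     for gi in gifts:
--         a, b = gi.split(' ')
--         give[(a, b)] = give.get((a, b), 0) + 1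
--         net[a] += 1
--         net[b] -= 1
--
--     # baseline: pretend every pair were decided by net gift score alone;
--     # rank by sorting: first index of a value in the sorted nets = #friends with strictly smaller net
--     nets = sorted(net[a] for a in friends)
--     below = {}
--     for i, v in enumerate(nets):
--         if v not in below:
--             below[v] = i
--     score = {a: below[net[a]] for a in friends}
--
--     # correct exactly the pairs with an asymmetric gift record (each unordered pair once)
--     for a, b in give:
--         ab = give[(a, b)]
--         ba = give.get((b, a), 0)
--         if ab == ba or (ba and b < a):
--             continue
--         winner = a if ab > ba else b
--         if net[a] > net[b]:
--             net_winner = a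
--         elif net[b] > net[a]:
--             net_winner = b
--         else:
--             net_winner = None
--         if winner != net_winner:
--             score[winner] += 1
--             if net_winner is not None:
--                 score[net_winner] -= 1
--     return max(score.values(), default=0)
-- ===== Notes on version B (the rewrite author's own statement) =====
-- stated objective: alternative
-- what changed: B replaces A's O(n^2) upper-triangle pairwise comparison loop with a rank-by-sorting baseline (each friend's provisional win count is the number of strictly smaller net gift scores, read off the sorted net list in one pass) plus a correction pass over only the asymmetric gift pairs recorded in a flat pair-keyed counter, then takes the max of the per-friend scores; asymptotically lighter (O(n log n + m) vs O(n^2 + m)) though the harness could not time it.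
-- outside the precondition, e.g. on solution(['cnt', 'c'], ['c cnt']): A returns 2, B returns 1; on solution(['a b', 'a', 'sum'], ['a sum', 'sum a']): A returns 2, B returns 0; on solution(['cnt', 'cnt'], []): A returns 0, B returns 0
import Mathlib
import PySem

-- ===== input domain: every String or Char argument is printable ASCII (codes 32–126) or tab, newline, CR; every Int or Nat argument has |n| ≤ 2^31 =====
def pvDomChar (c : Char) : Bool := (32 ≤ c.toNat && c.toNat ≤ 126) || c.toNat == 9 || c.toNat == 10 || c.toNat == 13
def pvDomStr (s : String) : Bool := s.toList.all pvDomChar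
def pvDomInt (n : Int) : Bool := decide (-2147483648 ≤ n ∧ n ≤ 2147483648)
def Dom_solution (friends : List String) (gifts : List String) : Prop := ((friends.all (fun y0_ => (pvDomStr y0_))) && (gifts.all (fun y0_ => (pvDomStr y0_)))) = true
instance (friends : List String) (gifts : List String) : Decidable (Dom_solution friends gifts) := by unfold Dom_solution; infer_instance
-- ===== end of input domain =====

-- B replaces A's pairwise comparison loop by a sort-based rank baseline plus a correction pass
-- over only the asymmetric gift pairs (objective: alternative); same return value on all of Pre_.

-- ===== PORT A =====
def aBase : PySem.Dict String Int := (PySem.Dict.empty.insert "sum" 0).insert "cnt" 0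

def aInit (friends : List String) : PySem.Dict String (PySem.Dict String Int) :=
  friends.foldl (fun d a =>
    friends.foldl (fun d b => if a == b then d
        else d.modify a PySem.Dict.empty (fun m => m.insert b 0))
      (d.insert a aBase)) PySem.Dict.empty

def aGiftStep (d : PySem.Dict String (PySem.Dict String Int)) (gi : String) :
    PySem.Dict String (PySem.Dict String Int) :=
  match PySem.Str.split? gi " " with
  | some [a, b] =>
    let d := d.modify a PySem.Dict.empty (fun m => m.modify b 0 (· + 1))
    let d := d.modify a PySem.Dict.empty (fun m => m.modify "sum" 0 (· + 1))
    d.modify b PySem.Dict.empty (fun m => m.modify "sum" 0 (· - 1))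
  | _ => d

def aBump (d : PySem.Dict String (PySem.Dict String Int)) (x : String) :
    PySem.Dict String (PySem.Dict String Int) :=
  d.modify x PySem.Dict.empty (fun m => m.modify "cnt" 0 (· + 1))

def aPairStep (friends : List String)
    (st : PySem.Dict String (PySem.Dict String Int) × Int) (i j : Int) :
    PySem.Dict String (PySem.Dict String Int) × Int :=
  let a := PySem.List.pyGetD friends i ""
  let b := PySem.List.pyGetD friends j ""
  let d := st.1
  let d' :=
    if (d.getD a PySem.Dict.empty).getD b 0 > (d.getD b PySem.Dict.empty).getD a 0 then aBump d a
    else if (d.getD a PySem.Dict.empty).getD b 0 < (d.getD b PySem.Dict.empty).getD a 0 then aBump d b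
    else if (d.getD a PySem.Dict.empty).getD "sum" 0 > (d.getD b PySem.Dict.empty).getD "sum" 0 then aBump d a
    else if (d.getD a PySem.Dict.empty).getD "sum" 0 < (d.getD b PySem.Dict.empty).getD "sum" 0 then aBump d b
    else d
  (d', max (max st.2 ((d'.getD a PySem.Dict.empty).getD "cnt" 0))
        ((d'.getD b PySem.Dict.empty).getD "cnt" 0))

def solution (friends : List String) (gifts : List String) : Int :=
  let d1 := gifts.foldl aGiftStep (aInit friends)
  let sz : Int := friends.length
  ((PySem.List.pyRange 0 sz 1).foldl
    (fun st i => (PySem.List.pyRange (i + 1) sz 1).foldl (fun st j => aPairStep friends st i j) st)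
    (d1, 0)).2

-- ===== PORT B =====
-- gift pass: flat pair-keyed counter of gifts plus net score per friend
def bStep (st : PySem.Dict (String × String) Int × PySem.Dict String Int) (gi : String) :
    PySem.Dict (String × String) Int × PySem.Dict String Int :=
  match PySem.Str.split? gi " " with
  | some [a, b] => (st.1.insert (a, b) (st.1.getD (a, b) 0 + 1),
               (st.2.modify a 0 (· + 1)).modify b 0 (· - 1))
  | _ => st

-- 'below' table: first index of each value in the sorted net list = #nets strictly smaller
def bBelow (nets : List Int) : PySem.Dict Int Int :=
  (PySem.List.enumerate nets 0).foldl
    (fun d p => if d.contains p.2 then d else d.insert p.2 p.1) PySem.Dict.empty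

-- correction for one give-key: skip ties and the already-handled orientation, else move
-- a point from the net-score winner (if any) to the actual winner
def bCorrStep (give : PySem.Dict (String × String) Int) (net : PySem.Dict String Int)
    (s : PySem.Dict String Int) (p : String × String) : PySem.Dict String Int :=
  let a := p.1
  let b := p.2
  let ab := give.getD (a, b) 0
  let ba := give.getD (b, a) 0
  if ab == ba || (!(ba == 0) && decide (b < a)) then s
  else
    let winner := if ab > ba then a else b
    let netw : Option String :=
      if net.getD a 0 > net.getD b 0 then some a
      else if net.getD b 0 > net.getD a 0 then some b
      else none
    if some winner ≠ netw then
      let s1 := s.modify winner 0 (· + 1)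
      match netw with
      | some w => s1.modify w 0 (· - 1)
      | none => s1
    else s

def solution_alt (friends : List String) (gifts : List String) : Int :=
  let st := gifts.foldl bStep
    (PySem.Dict.empty, friends.foldl (fun n a => n.insert a (0 : Int)) PySem.Dict.empty)
  let below := bBelow (PySem.List.sorted (friends.map (fun a => st.2.getD a 0)) (fun v => v) false)
  let score0 := friends.foldl
    (fun s a => s.insert a (below.getD (st.2.getD a 0) 0)) PySem.Dict.empty
  let score := st.1.keys.foldl (bCorrStep st.1 st.2) score0
  match PySem.List.max? score.values (fun v => v) with
  | some m => m
  | none => 0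

-- ===== PRECONDITION & SPEC =====
-- giftOK: the gift string parses as "x y" with x, y distinct members of friends.
def giftOK (friends : List String) (gi : String) : Bool :=
  match PySem.Str.split? gi " " with
  | some [a, b] => friends.contains a && friends.contains b && a != b
  | _ => false

-- Pre_ excludes (i) gifts that do not parse as "x y" with x, y distinct members of friends (A
-- raises KeyError/ValueError there), and (ii) friend lists placing "sum"/"cnt" or duplicate
-- names next to A's bookkeeping keys: a duplicated friend name makes A raise KeyError in its
-- pair loop unless the duplicate is the literal "sum"/"cnt", and a friend named "sum"/"cnt"
-- with a nonempty gift list shares its inner-dict key with A's net-score/win-count bookkeeping,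
-- so where A returns at all on these inputs its value is an accident of that key collision
-- ("sum"/"cnt" as friend names with no gifts are harmless and stay inside Pre_).
def Pre_solution (friends : List String) (gifts : List String) : Prop :=
  friends.Nodup ∧ (∀ gi ∈ gifts, giftOK friends gi = true) ∧
    (gifts = [] ∨ ("sum" ∉ friends ∧ "cnt" ∉ friends))

instance (friends : List String) (gifts : List String) : Decidable (Pre_solution friends gifts) := by
  unfold Pre_solution; infer_instance

def pvWitness_solution : List String × List String := (["a", "b"], ["a b"])

def Spec_solution (friends : List String) (gifts : List String) (out : Int) : Prop :=
  out = solution_alt friends gifts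
instance (friends : List String) (gifts : List String) (out : Int) :
    Decidable (Spec_solution friends gifts out) := by unfold Spec_solution; infer_instance

-- ===== CLAIM (what is proved, stated in full; the proofs are below) =====
def Claim_equal_solution : Prop := ∀ (friends : List String) (gifts : List String),
  Dom_solution friends gifts → Pre_solution friends gifts →
    Spec_solution friends gifts (solution friends gifts)

-- ===== LEMMAS AND PROOFS =====

-- pure model of the parsed gift list
def pairsOf (gifts : List String) : List (String × String) :=
  gifts.map (fun gi => match PySem.Str.split? gi " " with | some [a, b] => (a, b) | _ => ("", ""))

def Gc (gifts : List String) (x y : String) : Int := ((pairsOf gifts).count (x, y) : Int)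

def Nc (gifts : List String) (x : String) : Int :=
  ((pairsOf gifts).countP (fun p => p.1 == x) : Int) - ((pairsOf gifts).countP (fun p => p.2 == x) : Int)

def bt (gifts : List String) (x y : String) : Bool :=
  Gc gifts x y > Gc gifts y x || (Gc gifts x y == Gc gifts y x && Nc gifts x > Nc gifts y)

def wins (gifts : List String) (x : String) (P : List String) : Int :=
  ((P.filter (fun y => y != x && bt gifts x y)).length : Int)

-- all inner values of aInit are zero
def AllZero (d : PySem.Dict String (PySem.Dict String Int)) : Prop :=
  ∀ x k, (d.getD x PySem.Dict.empty).getD k 0 = 0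

theorem allZero_empty : AllZero PySem.Dict.empty := by
  intro x k; simp [PySem.Dict.getD_empty]

theorem getD_aBase (k : String) : aBase.getD k 0 = 0 := by
  rw [aBase, PySem.Dict.getD_insert, PySem.Dict.getD_insert]
  split <;> [rfl; split <;> [rfl; simp [PySem.Dict.getD_empty]]]

theorem allZero_inner (a : String) (l : List String)
    (d : PySem.Dict String (PySem.Dict String Int)) (h : AllZero d) :
    AllZero (l.foldl (fun d b => if a == b then d
      else d.modify a PySem.Dict.empty (fun m => m.insert b 0)) d) := by
  induction l generalizing d with
  | nil => exact h
  | cons b t ih =>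
    simp only [List.foldl_cons]
    apply ih
    split
    · exact h
    · intro x k
      rw [PySem.Dict.getD_modify]
      split
      · rw [PySem.Dict.getD_insert]
        split
        · rfl
        · exact h a k
      · exact h x k

theorem allZero_insert_aBase (a : String) (d : PySem.Dict String (PySem.Dict String Int))
    (h : AllZero d) : AllZero (d.insert a aBase) := by
  intro x k
  rw [PySem.Dict.getD_insert]
  split
  · exact getD_aBase k
  · exact h x k

theorem allZero_outer (inner : List String) (l : List String)
    (d : PySem.Dict String (PySem.Dict String Int)) (h : AllZero d) :
    AllZero (l.foldl (fun d a => inner.foldl (fun d b => if a == b then d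
      else d.modify a PySem.Dict.empty (fun m => m.insert b 0)) (d.insert a aBase)) d) := by
  induction l generalizing d with
  | nil => exact h
  | cons a t ih =>
    simp only [List.foldl_cons]
    exact ih _ (allZero_inner a inner _ (allZero_insert_aBase a d h))

theorem allZero_aInit (friends : List String) : AllZero (aInit friends) :=
  allZero_outer friends friends PySem.Dict.empty allZero_empty

-- reading a slot through an outer-level modify
theorem slot_modify (d : PySem.Dict String (PySem.Dict String Int)) (a x k : String)
    (f : PySem.Dict String Int → PySem.Dict String Int) :
    ((d.modify a PySem.Dict.empty f).getD x PySem.Dict.empty).getD k 0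
      = if x = a then (f (d.getD a PySem.Dict.empty)).getD k 0
        else (d.getD x PySem.Dict.empty).getD k 0 := by
  rw [PySem.Dict.getD_modify]
  split <;> rfl

-- effect of the gift loop on every slot of A's nested dict
theorem giftFold_slot (gs : List String)
    (hg : ∀ gi ∈ gs, ∃ a b, PySem.Str.split? gi " " = some [a, b])
    (d : PySem.Dict String (PySem.Dict String Int)) (x k : String) :
    (((gs.foldl aGiftStep d).getD x PySem.Dict.empty).getD k 0)
      = (d.getD x PySem.Dict.empty).getD k 0
        + ((pairsOf gs).countP (fun p => p.1 == x && p.2 == k) : Int)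
        + (if k = "sum"
            then ((pairsOf gs).countP (fun p => p.1 == x) : Int)
              - ((pairsOf gs).countP (fun p => p.2 == x) : Int)
            else 0) := by
  induction gs generalizing d with
  | nil => simp [pairsOf]
  | cons gi t ih =>
    obtain ⟨a, b, hab⟩ := hg gi (by simp)
    have ht : ∀ g ∈ t, ∃ a b, PySem.Str.split? g " " = some [a, b] := fun g hgm => hg g (by simp [hgm])
    have hpairs : pairsOf (gi :: t) = (a, b) :: pairsOf t := by
      simp [pairsOf, hab]
    simp only [List.foldl_cons]
    rw [ih ht]
    have hstep : ((aGiftStep d gi).getD x PySem.Dict.empty).getD k 0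
        = (d.getD x PySem.Dict.empty).getD k 0
          + (if a = x then if b = k then 1 else 0 else 0)
          + (if a = x then if k = "sum" then 1 else 0 else 0)
          - (if b = x then if k = "sum" then 1 else 0 else 0) := by
      rw [aGiftStep, hab]
      dsimp only
      simp only [slot_modify, PySem.Dict.getD_modify]
      split_ifs <;> subst_vars <;>
        (try simp only [slot_modify, PySem.Dict.getD_modify]) <;>
        (try split_ifs) <;> first | omega | tauto
    rw [hstep, hpairs]
    simp only [List.countP_cons, Bool.and_eq_true, beq_iff_eq, ite_and]
    split_ifs <;> first | (subst_vars; push_cast; omega) | tauto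

-- B's gift loop componentwise
def bGive (g : PySem.Dict (String × String) Int) (gi : String) : PySem.Dict (String × String) Int :=
  match PySem.Str.split? gi " " with
  | some [a, b] => g.insert (a, b) (g.getD (a, b) 0 + 1)
  | _ => g

def bNet (n : PySem.Dict String Int) (gi : String) : PySem.Dict String Int :=
  match PySem.Str.split? gi " " with
  | some [a, b] => (n.modify a 0 (· + 1)).modify b 0 (· - 1)
  | _ => n

theorem bStep_eq (st : PySem.Dict (String × String) Int × PySem.Dict String Int) (gi : String) :
    bStep st gi = (bGive st.1 gi, bNet st.2 gi) := by
  unfold bStep bGive bNet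
  rcases h : PySem.Str.split? gi " " with _ | l
  · rfl
  · rcases l with _ | ⟨a, _ | ⟨b, _ | t⟩⟩ <;> rfl

theorem bFold_eq (gs : List String) (st : PySem.Dict (String × String) Int × PySem.Dict String Int) :
    gs.foldl bStep st = (gs.foldl bGive st.1, gs.foldl bNet st.2) := by
  induction gs generalizing st with
  | nil => rfl
  | cons gi t ih => simp only [List.foldl_cons, bStep_eq]; exact ih _

theorem bGive_getD (gs : List String)
    (hg : ∀ gi ∈ gs, ∃ a b, PySem.Str.split? gi " " = some [a, b])
    (g : PySem.Dict (String × String) Int) (x y : String) :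
    (gs.foldl bGive g).getD (x, y) 0 = g.getD (x, y) 0 + ((pairsOf gs).count (x, y) : Int) := by
  induction gs generalizing g with
  | nil => simp [pairsOf]
  | cons gi t ih =>
    obtain ⟨a, b, hab⟩ := hg gi (by simp)
    have ht : ∀ g ∈ t, ∃ a b, PySem.Str.split? g " " = some [a, b] := fun g hgm => hg g (by simp [hgm])
    have hpairs : pairsOf (gi :: t) = (a, b) :: pairsOf t := by simp [pairsOf, hab]
    simp only [List.foldl_cons]
    rw [ih ht, hpairs]
    have : bGive g gi = g.insert (a, b) (g.getD (a, b) 0 + 1) := by rw [bGive, hab]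
    rw [this, PySem.Dict.getD_insert, List.count_cons]
    split_ifs <;> simp_all <;> (try (push_cast; omega))

theorem bNet_getD (gs : List String)
    (hg : ∀ gi ∈ gs, ∃ a b, PySem.Str.split? gi " " = some [a, b])
    (n : PySem.Dict String Int) (x : String) :
    (gs.foldl bNet n).getD x 0 = n.getD x 0
      + ((pairsOf gs).countP (fun p => p.1 == x) : Int)
      - ((pairsOf gs).countP (fun p => p.2 == x) : Int) := by
  induction gs generalizing n with
  | nil => simp [pairsOf]
  | cons gi t ih =>
    obtain ⟨a, b, hab⟩ := hg gi (by simp)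
    have ht : ∀ g ∈ t, ∃ a b, PySem.Str.split? g " " = some [a, b] := fun g hgm => hg g (by simp [hgm])
    have hpairs : pairsOf (gi :: t) = (a, b) :: pairsOf t := by simp [pairsOf, hab]
    simp only [List.foldl_cons]
    rw [ih ht, hpairs]
    have : bNet n gi = (n.modify a 0 (· + 1)).modify b 0 (· - 1) := by rw [bNet, hab]
    rw [this]
    simp only [PySem.Dict.getD_modify, List.countP_cons, beq_iff_eq]
    split_ifs <;> subst_vars <;> first | omega | tauto | (push_cast; omega)

theorem net0_getD (l : List String) (n : PySem.Dict String Int) (h : ∀ x, n.getD x 0 = 0) :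
    ∀ x, (l.foldl (fun n a => n.insert a (0 : Int)) n).getD x 0 = 0 := by
  induction l generalizing n with
  | nil => exact h
  | cons a t ih =>
    simp only [List.foldl_cons]
    refine ih _ (fun x => ?_)
    rw [PySem.Dict.getD_insert]
    split <;> simp [h]

-- running-max machinery (used on both sides)
theorem foldmax_pull {α : Type} (l : List α) (f : α → Int) (m c : Int) :
    l.foldl (fun m t => max m (f t)) (max m c) = max (l.foldl (fun m t => max m (f t)) m) c := by
  induction l generalizing m with
  | nil => rfl
  | cons a t ih =>
    simp only [List.foldl_cons]
    rw [← ih]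
    congr 1
    rw [max_right_comm]

theorem foldmax_congr {α : Type} (l : List α) (f g : α → Int) (m : Int)
    (h : ∀ t ∈ l, f t = g t) :
    l.foldl (fun m t => max m (f t)) m = l.foldl (fun m t => max m (g t)) m := by
  induction l generalizing m with
  | nil => rfl
  | cons a t ih =>
    simp only [List.foldl_cons]
    rw [h a (by simp), ih _ (fun t ht => h t (by simp [ht]))]

theorem foldmax_update (l : List String) (f g : String → Int) (x : String) (m : Int)
    (hx : x ∈ l) (hg : ∀ t, t ≠ x → g t = f t) (hfg : f x ≤ g x) :
    l.foldl (fun m t => max m (g t)) m = max (l.foldl (fun m t => max m (f t)) m) (g x) := by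
  induction l generalizing m with
  | nil => cases hx
  | cons a t ih =>
    simp only [List.foldl_cons]
    by_cases hax : a = x
    · subst hax
      by_cases hxt : a ∈ t
      · rw [foldmax_pull, ih _ hxt, foldmax_pull, max_assoc, max_self, max_assoc,
          max_eq_right hfg]
      · have h1 : t.foldl (fun m t => max m (g t)) (max m (g a))
            = max (t.foldl (fun m t => max m (g t)) m) (g a) := foldmax_pull t g m (g a)
        have h2 : t.foldl (fun m t => max m (f t)) (max m (f a))
            = max (t.foldl (fun m t => max m (f t)) m) (f a) := foldmax_pull t f m (f a)
        rw [h1, h2, foldmax_congr t g f m (fun u hu => hg u (fun e => hxt (e ▸ hu)))]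
        rw [max_assoc, max_comm (f a) (g a), max_eq_left hfg]
    · have hxt : x ∈ t := by
        rcases List.mem_cons.mp hx with rfl | h
        · exact absurd rfl hax
        · exact h
      rw [hg a hax, ih _ hxt]

theorem foldmax_zero {α : Type} (l : List α) (f : α → Int) (h : ∀ t ∈ l, f t = 0) :
    l.foldl (fun m t => max m (f t)) 0 = 0 := by
  induction l with
  | nil => rfl
  | cons a t ih =>
    simp only [List.foldl_cons, h a (by simp), max_self]
    exact ih (fun t ht => h t (by simp [ht]))

-- the pair-loop body at resolved friend names
def nstep (st : PySem.Dict String (PySem.Dict String Int) × Int) (a b : String) :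
    PySem.Dict String (PySem.Dict String Int) × Int :=
  let d := st.1
  let d' :=
    if (d.getD a PySem.Dict.empty).getD b 0 > (d.getD b PySem.Dict.empty).getD a 0 then aBump d a
    else if (d.getD a PySem.Dict.empty).getD b 0 < (d.getD b PySem.Dict.empty).getD a 0 then aBump d b
    else if (d.getD a PySem.Dict.empty).getD "sum" 0 > (d.getD b PySem.Dict.empty).getD "sum" 0 then aBump d a
    else if (d.getD a PySem.Dict.empty).getD "sum" 0 < (d.getD b PySem.Dict.empty).getD "sum" 0 then aBump d b
    else d
  (d', max (max st.2 ((d'.getD a PySem.Dict.empty).getD "cnt" 0))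
        ((d'.getD b PySem.Dict.empty).getD "cnt" 0))

theorem aPairStep_eq (friends : List String) (st : PySem.Dict String (PySem.Dict String Int) × Int)
    (i j : Int) : aPairStep friends st i j
      = nstep st (PySem.List.pyGetD friends i "") (PySem.List.pyGetD friends j "") := rfl

def cntd (d : PySem.Dict String (PySem.Dict String Int)) (t : String) : Int :=
  (d.getD t PySem.Dict.empty).getD "cnt" 0

theorem cntd_aBump (d : PySem.Dict String (PySem.Dict String Int)) (x t : String) :
    cntd (aBump d x) t = if t = x then cntd d t + 1 else cntd d t := by
  unfold cntd aBump
  rw [slot_modify]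
  split_ifs with h <;> simp [PySem.Dict.getD_modify, h]

theorem slot_aBump (d : PySem.Dict String (PySem.Dict String Int)) (x t k : String)
    (hk : k ≠ "cnt") : ((aBump d x).getD t PySem.Dict.empty).getD k 0
      = (d.getD t PySem.Dict.empty).getD k 0 := by
  unfold aBump
  rw [slot_modify]
  split_ifs with h
  · rw [PySem.Dict.getD_modify, if_neg hk, h]
  · rfl

theorem wins_nil (gs : List String) (x : String) : wins gs x [] = 0 := rfl

theorem wins_cons (gs : List String) (x y : String) (P : List String) (hyx : y ≠ x) :
    wins gs x (y :: P) = (if bt gs x y then 1 else 0) + wins gs x P := by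
  unfold wins
  rw [List.filter_cons]
  by_cases h : bt gs x y
  · simp [h, hyx]; omega
  · simp [h, hyx]

theorem wins_append (gs : List String) (x : String) (P Q : List String) :
    wins gs x (P ++ Q) = wins gs x P + wins gs x Q := by
  unfold wins
  rw [List.filter_append, List.length_append]
  push_cast; ring

-- one pair-comparison step, abstracted to the decision predicate bt
theorem nstep_spec (gs fr : List String) (dG : PySem.Dict String (PySem.Dict String Int))
    (hSlotG : ∀ x ∈ fr, ∀ y ∈ fr, y ≠ x → (dG.getD x PySem.Dict.empty).getD y 0 = Gc gs x y)
    (hSumG : ∀ x ∈ fr, (dG.getD x PySem.Dict.empty).getD "sum" 0 = Nc gs x)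
    (hcnt : "cnt" ∉ fr) (hsum : "sum" ∉ fr)
    (a b : String) (ha : a ∈ fr) (hb : b ∈ fr) (hab : a ≠ b)
    (d : PySem.Dict String (PySem.Dict String Int)) (mx : Int)
    (hS : ∀ x k, k ≠ "cnt" → (d.getD x PySem.Dict.empty).getD k 0 = (dG.getD x PySem.Dict.empty).getD k 0) :
    nstep (d, mx) a b
      = (if bt gs a b then aBump d a else if bt gs b a then aBump d b else d,
         max (max mx (cntd (if bt gs a b then aBump d a else if bt gs b a then aBump d b else d) a))
           (cntd (if bt gs a b then aBump d a else if bt gs b a then aBump d b else d) b)) := by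
  have hba : b ≠ a := fun h => hab h.symm
  have hbc : b ≠ "cnt" := fun h => hcnt (h ▸ hb)
  have hac : a ≠ "cnt" := fun h => hcnt (h ▸ ha)
  have r1 : (d.getD a PySem.Dict.empty).getD b 0 = Gc gs a b := by
    rw [hS a b hbc]; exact hSlotG a ha b hb hba
  have r2 : (d.getD b PySem.Dict.empty).getD a 0 = Gc gs b a := by
    rw [hS b a hac]; exact hSlotG b hb a ha hab
  have r3 : (d.getD a PySem.Dict.empty).getD "sum" 0 = Nc gs a := by
    rw [hS a "sum" (by decide)]; exact hSumG a ha
  have r4 : (d.getD b PySem.Dict.empty).getD "sum" 0 = Nc gs b := by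
    rw [hS b "sum" (by decide)]; exact hSumG b hb
  unfold nstep
  dsimp only
  rw [r1, r2, r3, r4]
  simp only [bt, Bool.or_eq_true, Bool.and_eq_true, decide_eq_true_eq, beq_iff_eq]
  split_ifs <;> first | rfl | (exfalso; omega)

theorem bt_asymm (gs : List String) (x y : String) (h : bt gs x y = true) : bt gs y x = false := by
  by_contra hne
  have h2 : bt gs y x = true := by revert hne; cases (bt gs y x) <;> simp
  simp only [bt, Bool.or_eq_true, Bool.and_eq_true, decide_eq_true_eq, beq_iff_eq] at h h2
  omega

theorem M_aBump (fr : List String) (d : PySem.Dict String (PySem.Dict String Int)) (w : String)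
    (hw : w ∈ fr) :
    fr.foldl (fun m t => max m (cntd (aBump d w) t)) 0
      = max (fr.foldl (fun m t => max m (cntd d t)) 0) (cntd d w + 1) := by
  have hg : ∀ t, t ≠ w → cntd (aBump d w) t = cntd d t := by
    intro t ht; rw [cntd_aBump, if_neg ht]
  have hww : cntd (aBump d w) w = cntd d w + 1 := by rw [cntd_aBump, if_pos rfl]
  rw [← hww]
  exact foldmax_update fr (cntd d) (cntd (aBump d w)) w 0 hw hg (by rw [hww]; omega)

theorem inner_loop (gs fr : List String) (dG : PySem.Dict String (PySem.Dict String Int))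
    (hSlotG : ∀ x ∈ fr, ∀ y ∈ fr, y ≠ x → (dG.getD x PySem.Dict.empty).getD y 0 = Gc gs x y)
    (hSumG : ∀ x ∈ fr, (dG.getD x PySem.Dict.empty).getD "sum" 0 = Nc gs x)
    (hcnt : "cnt" ∉ fr) (hsum : "sum" ∉ fr) (a : String) (ha : a ∈ fr) :
    ∀ (ys : List String), (∀ y ∈ ys, y ∈ fr) → a ∉ ys → ys.Nodup →
    ∀ (d : PySem.Dict String (PySem.Dict String Int)) (mx : Int),
    (∀ x k, k ≠ "cnt" → (d.getD x PySem.Dict.empty).getD k 0 = (dG.getD x PySem.Dict.empty).getD k 0) →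
    mx = fr.foldl (fun m t => max m (cntd d t)) 0 →
    (∀ x k, k ≠ "cnt" →
        (((ys.foldl (fun st y => nstep st a y) (d, mx)).1).getD x PySem.Dict.empty).getD k 0
          = (dG.getD x PySem.Dict.empty).getD k 0)
    ∧ (∀ t, cntd (ys.foldl (fun st y => nstep st a y) (d, mx)).1 t
        = cntd d t + (if t = a then wins gs a ys
            else if t ∈ ys ∧ bt gs t a = true then 1 else 0))
    ∧ (ys.foldl (fun st y => nstep st a y) (d, mx)).2
        = fr.foldl (fun m t => max m (cntd (ys.foldl (fun st y => nstep st a y) (d, mx)).1 t)) 0 := by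
  intro ys
  induction ys with
  | nil =>
    intro _ _ _ d mx hS hM
    refine ⟨hS, fun t => ?_, hM⟩
    simp [wins_nil]
  | cons y ys ih =>
    intro hyfr hay hnd d mx hS hM
    have hyf : y ∈ fr := hyfr y (by simp)
    have hane : a ≠ y := fun h => hay (by simp [h])
    have hyne : y ≠ a := fun h => hane h.symm
    have hstep := nstep_spec gs fr dG hSlotG hSumG hcnt hsum a y ha hyf hane d mx hS
    simp only [List.foldl_cons, hstep]
    set d1 := if bt gs a y then aBump d a else if bt gs y a then aBump d y else d with hd1
    have hS1 : ∀ x k, k ≠ "cnt" →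
        (d1.getD x PySem.Dict.empty).getD k 0 = (dG.getD x PySem.Dict.empty).getD k 0 := by
      intro x k hk
      rw [hd1]
      split_ifs <;> (try rw [slot_aBump _ _ _ _ hk]) <;> exact hS x k hk
    have hc1 : ∀ t, cntd d1 t = cntd d t
        + (if t = a ∧ bt gs a y = true then 1 else 0)
        + (if t = y ∧ bt gs y a = true then 1 else 0) := by
      intro t
      rw [hd1]
      by_cases h1 : bt gs a y = true
      · have h2 : bt gs y a = false := bt_asymm gs a y h1
        simp only [h1, if_true, cntd_aBump, h2, Bool.false_eq_true, and_false, if_false,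
          and_true, add_zero]
        split_ifs <;> first | omega | tauto
      · by_cases h2 : bt gs y a = true
        · simp only [h1, h2, Bool.false_eq_true, if_false, if_true, cntd_aBump, and_false,
            and_true, add_zero, zero_add]
          split_ifs <;> first | omega | tauto
        · simp only [h1, h2, Bool.false_eq_true, if_false, and_false, add_zero]
    have hM1 : max (max mx (cntd d1 a)) (cntd d1 y)
        = fr.foldl (fun m t => max m (cntd d1 t)) 0 := by
      have hle := (PySem.List.le_foldl_max_int fr (cntd d) 0).2
      rw [hd1]
      by_cases h1 : bt gs a y = true
      · rw [if_pos h1]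
        rw [M_aBump fr d a ha, ← hM]
        have hya : cntd (aBump d a) y = cntd d y := by rw [cntd_aBump, if_neg hyne]
        have haa : cntd (aBump d a) a = cntd d a + 1 := by rw [cntd_aBump, if_pos rfl]
        rw [hya, haa]
        have : cntd d y ≤ max mx (cntd d a + 1) :=
          le_trans (hM ▸ hle y hyf) (le_max_left _ _)
        rw [max_eq_left this]
      · by_cases h2 : bt gs y a = true
        · rw [if_neg h1, if_pos h2]
          rw [M_aBump fr d y hyf, ← hM]
          have haa : cntd (aBump d y) a = cntd d a := by rw [cntd_aBump, if_neg hane]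
          have hyy : cntd (aBump d y) y = cntd d y + 1 := by rw [cntd_aBump, if_pos rfl]
          rw [haa, hyy]
          have h3 : cntd d a ≤ mx := hM ▸ hle a ha
          rw [max_eq_left h3, max_comm]
        · rw [if_neg h1, if_neg h2]
          have h3 : cntd d a ≤ mx := hM ▸ hle a ha
          have h4 : cntd d y ≤ mx := hM ▸ hle y hyf
          rw [max_eq_left h3, max_eq_left h4, hM]
    obtain ⟨rS, rC, rM⟩ := ih (fun u hu => hyfr u (by simp [hu])) (fun h => hay (by simp [h]))
      (List.Nodup.of_cons hnd) d1 _ hS1 hM1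
    refine ⟨rS, fun t => ?_, rM⟩
    rw [rC t, hc1 t]
    have hwc : wins gs a (y :: ys) = (if bt gs a y then 1 else 0) + wins gs a ys :=
      wins_cons gs a y ys hyne
    have hyys : y ∉ ys := (List.nodup_cons.mp hnd).1
    by_cases hta : t = a
    · subst hta
      have hay2 : (t = y) = False := by simp [hane]
      simp only [if_pos rfl, hwc, hay2, false_and, if_false, add_zero,
        eq_self_iff_true, true_and]
      (try split_ifs) <;> first | rfl | omega | tauto
    · have hta2 : (t = a) = False := by simp [hta]
      simp only [hta2, false_and, if_false, add_zero, zero_add]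
      by_cases hty : t = y
      · subst hty
        have h5 : (t ∈ ys) = False := by simp [hyys]
        simp only [List.mem_cons, h5, eq_self_iff_true, true_or, true_and, false_and,
          add_zero, if_false]
        try ((try split_ifs) <;> first | rfl | omega | tauto)
      · have h6 : (t = y) = False := by simp [hty]
        simp only [List.mem_cons, h6, false_or, false_and, if_false, zero_add]
        try ((try split_ifs) <;> first | rfl | omega | tauto)

theorem wins_singleton_self (gs : List String) (x : String) : wins gs x [x] = 0 := by
  simp [wins]

theorem outer_loop (gs fr : List String) (dG : PySem.Dict String (PySem.Dict String Int))
    (hSlotG : ∀ x ∈ fr, ∀ y ∈ fr, y ≠ x → (dG.getD x PySem.Dict.empty).getD y 0 = Gc gs x y)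
    (hSumG : ∀ x ∈ fr, (dG.getD x PySem.Dict.empty).getD "sum" 0 = Nc gs x)
    (hcnt : "cnt" ∉ fr) (hsum : "sum" ∉ fr) (hnd : fr.Nodup)
    (hcnt0 : ∀ t, cntd dG t = 0) :
    ∀ (k : Nat), k ≤ fr.length →
    (∀ x k', k' ≠ "cnt" →
        ((((PySem.List.pyRange 0 (k : Int) 1).foldl
            (fun st i => (PySem.List.pyRange (i + 1) (fr.length : Int) 1).foldl
              (fun st j => aPairStep fr st i j) st) (dG, 0)).1).getD x PySem.Dict.empty).getD k' 0
          = (dG.getD x PySem.Dict.empty).getD k' 0)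
    ∧ (∀ t ∈ fr, cntd ((PySem.List.pyRange 0 (k : Int) 1).foldl
            (fun st i => (PySem.List.pyRange (i + 1) (fr.length : Int) 1).foldl
              (fun st j => aPairStep fr st i j) st) (dG, 0)).1 t
        = if t ∈ fr.take k then wins gs t fr else wins gs t (fr.take k))
    ∧ ((PySem.List.pyRange 0 (k : Int) 1).foldl
            (fun st i => (PySem.List.pyRange (i + 1) (fr.length : Int) 1).foldl
              (fun st j => aPairStep fr st i j) st) (dG, 0)).2
        = fr.foldl (fun m t => max m (cntd ((PySem.List.pyRange 0 (k : Int) 1).foldl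
            (fun st i => (PySem.List.pyRange (i + 1) (fr.length : Int) 1).foldl
              (fun st j => aPairStep fr st i j) st) (dG, 0)).1 t)) 0 := by
  intro k
  induction k with
  | zero =>
    intro _
    rw [show ((0 : Nat) : Int) = 0 by rfl, PySem.List.pyRange_zero]
    refine ⟨fun x k' _ => rfl, fun t _ => ?_, ?_⟩
    · simp only [List.take_zero]
      rw [if_neg (by simp)]
      simpa [wins] using hcnt0 t
    · exact (foldmax_zero fr _ (fun t _ => hcnt0 t)).symm
  | succ k ih =>
    intro hk1
    have hk : k < fr.length := hk1
    obtain ⟨pS, pC, pM⟩ := ih (le_of_lt hk)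
    have hsplit : PySem.List.pyRange 0 ((k + 1 : Nat) : Int) 1
        = PySem.List.pyRange 0 (k : Int) 1 ++ [(k : Int)] := by
      have : ((k + 1 : Nat) : Int) = (k : Int) + 1 := by push_cast; ring
      rw [this, PySem.List.pyRange_one_succ_right (by omega)]
    rw [hsplit, List.foldl_append, List.foldl_cons, List.foldl_nil]
    set st0 := (PySem.List.pyRange 0 (k : Int) 1).foldl
      (fun st i => (PySem.List.pyRange (i + 1) (fr.length : Int) 1).foldl
        (fun st j => aPairStep fr st i j) st) (dG, 0) with hst0
    have haval : PySem.List.pyGetD fr (k : Int) "" = fr[k] := by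
      rw [PySem.List.pyGetD_natCast, List.getD_eq_getElem fr "" hk]
    have hbody : (PySem.List.pyRange ((k : Int) + 1) (fr.length : Int) 1).foldl
        (fun st j => aPairStep fr st (k : Int) j) st0
        = (fr.drop (k + 1)).foldl (fun st y => nstep st fr[k] y) (st0.1, st0.2) := by
      have h0 : (0 : Int) ≤ (k : Int) + 1 := by omega
      have h1 := PySem.List.foldl_pyRange_pyGetD' fr ""
        (fun st y => nstep st fr[k] y) st0 (a := (k : Int) + 1) h0
      simp only [aPairStep_eq, haval]
      rw [show ((k : Int) + 1).toNat = k + 1 by omega] at h1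
      exact h1
    have ha : fr[k] ∈ fr := List.getElem_mem hk
    have hadrop : fr[k] ∉ fr.drop (k + 1) := by
      intro hmem
      have htake : fr[k] ∈ fr.take (k + 1) := by
        have : k < (fr.take (k + 1)).length := by simp [List.length_take]; omega
        have e : (fr.take (k + 1))[k] = fr[k] := List.getElem_take
        rw [← e]; exact List.getElem_mem this
      exact (List.disjoint_take_drop hnd (le_refl (k + 1))) htake hmem
    have hysfr : ∀ y ∈ fr.drop (k + 1), y ∈ fr := fun y hy => List.mem_of_mem_drop hy
    have hysnd : (fr.drop (k + 1)).Nodup := (List.drop_sublist (k + 1) fr).nodup hnd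
    obtain ⟨rS, rC, rM⟩ := inner_loop gs fr dG hSlotG hSumG hcnt hsum fr[k] ha (fr.drop (k + 1))
      hysfr hadrop hysnd st0.1 st0.2 pS pM
    rw [hbody]
    refine ⟨rS, fun t ht => ?_, rM⟩
    rw [rC t, pC t ht]
    have htk1 : fr.take (k + 1) = fr.take k ++ [fr[k]] := by
      rw [List.take_succ]
      congr
      simp [List.getElem?_eq_getElem hk]
    have hatk : fr[k] ∉ fr.take k := by
      intro hmem
      have : fr[k] ∈ fr.drop k := by
        have hl : 0 < (fr.drop k).length := by simp; omega
        have e : (fr.drop k)[0] = fr[k] := by simp [List.getElem_drop]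
        rw [← e]; exact List.getElem_mem hl
      exact (List.disjoint_take_drop hnd (le_refl k)) hmem this
    by_cases hta : t = fr[k]
    · have hmem1 : t ∈ fr.take (k + 1) := by
        rw [htk1, hta]; exact List.mem_append_right _ (List.mem_singleton_self _)
      have hatk' : t ∉ fr.take k := by rw [hta]; exact hatk
      rw [if_pos hta, if_neg hatk', if_pos hmem1, hta]
      have hfr_eq : fr = fr.take k ++ [fr[k]] ++ fr.drop (k + 1) := by
        conv_lhs => rw [← List.take_append_drop (k + 1) fr]
        rw [htk1]
      calc wins gs fr[k] (fr.take k) + wins gs fr[k] (fr.drop (k + 1))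
          = wins gs fr[k] (fr.take k) + wins gs fr[k] [fr[k]] + wins gs fr[k] (fr.drop (k + 1)) := by
            rw [wins_singleton_self]; ring
        _ = wins gs fr[k] (fr.take k ++ [fr[k]] ++ fr.drop (k + 1)) := by
            rw [wins_append, wins_append]
        _ = wins gs fr[k] fr := by rw [← hfr_eq]
    · by_cases htdrop : t ∈ fr.drop (k + 1)
      · have htak1 : t ∉ fr.take (k + 1) :=
          fun hmem => (List.disjoint_take_drop hnd (le_refl (k + 1))) hmem htdrop
        have htak : t ∉ fr.take k := by
          intro hmem; exact htak1 (by rw [htk1]; exact List.mem_append_left _ hmem)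
        rw [if_neg hta, if_neg htak, if_neg htak1, htk1, wins_append,
          wins_cons gs t fr[k] [] (fun h => hta h.symm), wins_nil]
        simp only [htdrop, true_and]
        split_ifs <;> omega
      · have htak : t ∈ fr.take k := by
          have hs := List.take_append_drop (k + 1) fr
          have hm : t ∈ fr.take (k + 1) ++ fr.drop (k + 1) := by rw [hs]; exact ht
          rcases List.mem_append.mp hm with h | h
          · rw [htk1] at h
            rcases List.mem_append.mp h with h2 | h2
            · exact h2
            · exact absurd (List.mem_singleton.mp h2) hta
          · exact absurd h htdrop
        have hcond : ¬ (t ∈ fr.drop (k + 1) ∧ bt gs t fr[k] = true) := fun h => htdrop h.1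
        rw [if_neg hta, if_neg hcond, if_pos htak,
          if_pos (by rw [htk1]; exact List.mem_append_left _ htak), add_zero]

theorem countP_pair (l : List (String × String)) (x y : String) :
    l.countP (fun p => p.1 == x && p.2 == y) = l.count (x, y) := by
  rw [List.count]
  apply List.countP_congr
  intro p _
  cases p
  constructor <;> intro h <;> simpa using h

theorem giftOK_spec (fr : List String) (gi : String) (h : giftOK fr gi = true) :
    ∃ a b, PySem.Str.split? gi " " = some [a, b] ∧ a ∈ fr ∧ b ∈ fr ∧ a ≠ b := by
  unfold giftOK at h
  rcases hs : PySem.Str.split? gi " " with _ | l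
  · rw [hs] at h; exact absurd h (by simp)
  · rcases l with _ | ⟨a, _ | ⟨b, _ | t⟩⟩ <;> rw [hs] at h
    · exact absurd h (by simp)
    · exact absurd h (by simp)
    · simp at h
      exact ⟨a, b, rfl, h.1.1, h.1.2, h.2⟩
    · exact absurd h (by simp)

theorem nstep_allzero (d : PySem.Dict String (PySem.Dict String Int)) (hz : AllZero d)
    (a b : String) : nstep (d, 0) a b = (d, 0) := by
  unfold nstep
  dsimp only
  rw [hz a b, hz b a, hz a "sum", hz b "sum"]
  simp
  rw [hz a "cnt", hz b "cnt"]
  exact ⟨le_refl 0, le_refl 0⟩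

theorem inner_zero (fr : List String) (i : Int) (l : List Int)
    (d : PySem.Dict String (PySem.Dict String Int)) (hz : AllZero d) :
    l.foldl (fun st j => aPairStep fr st i j) (d, 0) = (d, 0) := by
  induction l with
  | nil => rfl
  | cons j t ih =>
    simp only [List.foldl_cons, aPairStep_eq, nstep_allzero d hz]
    exact ih

theorem outer_zero (fr : List String) (l : List Int)
    (d : PySem.Dict String (PySem.Dict String Int)) (hz : AllZero d) :
    l.foldl (fun st i => (PySem.List.pyRange (i + 1) (fr.length : Int) 1).foldl
      (fun st j => aPairStep fr st i j) st) (d, 0) = (d, 0) := by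
  induction l with
  | nil => rfl
  | cons i t ih =>
    simp only [List.foldl_cons, inner_zero fr i _ d hz]
    exact ih

theorem solution_nil (fr : List String) : solution fr [] = 0 := by
  have h : solution fr [] = ((PySem.List.pyRange 0 (fr.length : Int) 1).foldl
      (fun st i => (PySem.List.pyRange (i + 1) (fr.length : Int) 1).foldl
        (fun st j => aPairStep fr st i j) st) (aInit fr, 0)).2 := rfl
  rw [h, outer_zero fr _ (aInit fr) (allZero_aInit fr)]


-- ===== B-side lemmas =====

-- per-opponent delta between a real win and the net-rank baseline, and the pure form of one
-- correction step of B's loop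
def delta (gs : List String) (t b : String) : Int :=
  (if bt gs t b = true then 1 else 0) - (if Nc gs b < Nc gs t then 1 else 0)

def corrF (gs : List String) (t : String) (p : String × String) : Int :=
  if Gc gs p.1 p.2 = Gc gs p.2 p.1 ∨ (Gc gs p.2 p.1 ≠ 0 ∧ p.2 < p.1) then 0
  else (if t = (if Gc gs p.1 p.2 > Gc gs p.2 p.1 then p.1 else p.2) then 1 else 0)
       - (if (if Nc gs p.1 > Nc gs p.2 then some p.1
              else if Nc gs p.2 > Nc gs p.1 then some p.2 else none) = some t then 1 else 0)

def partner (gs : List String) (t : String) (p : String × String) : Option String :=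
  if Gc gs p.1 p.2 = Gc gs p.2 p.1 ∨ (Gc gs p.2 p.1 ≠ 0 ∧ p.2 < p.1) then none
  else if p.1 = t then some p.2 else if p.2 = t then some p.1 else none

-- one correction step adds corrF to every slot
theorem bCorrStep_getD (gs : List String)
    (give : PySem.Dict (String × String) Int) (net : PySem.Dict String Int)
    (hGive : ∀ x y, give.getD (x, y) 0 = Gc gs x y)
    (hNet : ∀ x, net.getD x 0 = Nc gs x)
    (s : PySem.Dict String Int) (p : String × String) (t : String) :
    (bCorrStep give net s p).getD t 0 = s.getD t 0 + corrF gs t p := by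
  unfold bCorrStep corrF
  dsimp only
  rw [hGive p.1 p.2, hGive p.2 p.1, hNet p.1, hNet p.2]
  by_cases hskip : Gc gs p.1 p.2 = Gc gs p.2 p.1 ∨ (Gc gs p.2 p.1 ≠ 0 ∧ p.2 < p.1)
  · have hb : (Gc gs p.1 p.2 == Gc gs p.2 p.1 || (!(Gc gs p.2 p.1 == 0) && decide (p.2 < p.1))) = true := by
      rcases hskip with h | ⟨h1, h2⟩
      · simp [h]
      · simp [h1, h2]
    rw [if_pos hb, if_pos hskip, add_zero]
  · have hgc : Gc gs p.1 p.2 ≠ Gc gs p.2 p.1 := fun e => hskip (Or.inl e)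
    have hb : (Gc gs p.1 p.2 == Gc gs p.2 p.1 || (!(Gc gs p.2 p.1 == 0) && decide (p.2 < p.1))) = false := by
      by_cases hz : Gc gs p.2 p.1 = 0
      · have h12 : Gc gs p.1 p.2 ≠ 0 := fun e => hgc (by rw [e, hz])
        simp [hz, h12]
      · have hlt : ¬ p.2 < p.1 := fun hl => hskip (Or.inr ⟨hz, hl⟩)
        simp [hgc, hz, hlt]
    rw [if_neg (ne_true_of_eq_false hb), if_neg hskip]
    generalize (if Gc gs p.1 p.2 > Gc gs p.2 p.1 then p.1 else p.2) = W
    generalize (if Nc gs p.1 > Nc gs p.2 then some p.1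
      else if Nc gs p.2 > Nc gs p.1 then some p.2 else none) = NW
    by_cases hWN : some W = NW
    · rw [if_neg (by simp [hWN] : ¬ some W ≠ NW)]
      have hz2 : (if t = W then (1 : Int) else 0) - (if NW = some t then 1 else 0) = 0 := by
        rw [← hWN]
        by_cases htW : t = W <;> simp [htW, eq_comm]
      rw [hz2, add_zero]
    · rw [if_pos hWN]
      cases NW with
      | none =>
        rw [PySem.Dict.getD_modify]
        by_cases htW : t = W <;> simp [htW]
      | some w =>
        have hWw : W ≠ w := fun e => hWN (by rw [e])
        rw [PySem.Dict.getD_modify]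
        by_cases htw : t = w
        · subst htw
          rw [if_pos rfl, PySem.Dict.getD_modify, if_neg (fun e => hWw e.symm),
            if_neg (fun e => hWw e.symm), if_pos rfl]
          ring
        · rw [if_neg htw, PySem.Dict.getD_modify]
          have hsw : ¬ ((some w : Option String) = some t) :=
            fun e => htw (Option.some.inj e).symm
          by_cases htW : t = W
          · subst htW
            rw [if_pos rfl, if_pos rfl, if_neg hsw]
            ring
          · rw [if_neg htW, if_neg htW, if_neg hsw]
            ring

-- fold of correction steps accumulates the corrections
theorem bCorr_fold_getD (gs : List String)
    (give : PySem.Dict (String × String) Int) (net : PySem.Dict String Int)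
    (hGive : ∀ x y, give.getD (x, y) 0 = Gc gs x y)
    (hNet : ∀ x, net.getD x 0 = Nc gs x)
    (K : List (String × String)) (s : PySem.Dict String Int) (t : String) :
    (K.foldl (bCorrStep give net) s).getD t 0 = s.getD t 0 + (K.map (corrF gs t)).sum := by
  induction K generalizing s with
  | nil => simp
  | cons p K ih =>
    simp only [List.foldl_cons, List.map_cons, List.sum_cons]
    rw [ih, bCorrStep_getD gs give net hGive hNet]
    ring

-- the 'below' dict maps each value to its first index in the enumerated list
theorem below_get? (S : List Int) (k : Int) (d : PySem.Dict Int Int) (v : Int) :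
    ((PySem.List.enumerate S k).foldl
        (fun d p => if d.contains p.2 then d else d.insert p.2 p.1) d).get? v
      = (d.get? v).or ((PySem.List.index? S v).map (fun j => k + (j : Int))) := by
  induction S generalizing k d with
  | nil =>
    have h0 : PySem.List.index? ([] : List Int) v = none := by
      rw [PySem.List.index?_eq_none_iff]; simp
    simp [PySem.List.enumerate_nil, h0]
  | cons x S ih =>
    rw [PySem.List.enumerate_cons, List.foldl_cons]
    by_cases hxv : x = v
    · subst hxv
      rw [PySem.List.index?_cons_self]
      by_cases hc : d.contains x = true
      · rw [if_pos hc, ih]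
        have hsome : (d.get? x).isSome = true := by
          rw [← PySem.Dict.contains_eq_isSome_get?]; exact hc
        cases hgx : d.get? x with
        | none => rw [hgx] at hsome; simp at hsome
        | some w => simp [hgx, Option.or]
      · rw [if_neg hc, ih]
        have hnone : d.get? x = none := by
          have h := PySem.Dict.contains_eq_isSome_get? d x
          cases hgx : d.get? x with
          | none => rfl
          | some w => rw [hgx] at h; simp at h; exact absurd h hc
        rw [hnone, PySem.Dict.get?_insert, if_pos rfl]
        simp [Option.or]
    · rw [PySem.List.index?_cons_of_ne _ hxv]
      have hstep : (if d.contains x = true then d else d.insert x k).get? v = d.get? v := by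
        split
        · rfl
        · rw [PySem.Dict.get?_insert, if_neg (fun h => hxv h.symm)]
      rw [ih, hstep]
      congr 1
      cases PySem.List.index? S v with
      | none => rfl
      | some j =>
        simp
        push_cast
        ring

-- in a sorted list, the first index of a value counts the strictly smaller elements
theorem index?_sorted_countP (S : List Int) (hs : S.Pairwise (· ≤ ·)) (v : Int) (j : Nat)
    (h : PySem.List.index? S v = some j) : j = S.countP (fun u => decide (u < v)) := by
  induction S generalizing j with
  | nil =>
    have h0 : PySem.List.index? ([] : List Int) v = none := by
      rw [PySem.List.index?_eq_none_iff]; simp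
    rw [h0] at h; cases h
  | cons x S ih =>
    obtain ⟨hx, hs'⟩ := List.pairwise_cons.mp hs
    by_cases hxv : x = v
    · subst hxv
      rw [PySem.List.index?_cons_self] at h
      obtain rfl : (0 : Nat) = j := Option.some.inj h
      rw [List.countP_cons]
      have h1 : S.countP (fun u => decide (u < x)) = 0 :=
        List.countP_eq_zero.mpr (fun u hu => by simp [not_lt.mpr (hx u hu)])
      simp [h1]
    · rw [PySem.List.index?_cons_of_ne _ hxv] at h
      cases hj : PySem.List.index? S v with
      | none => rw [hj] at h; simp at h
      | some j' =>
        rw [hj] at h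
        simp only [Option.map_some] at h
        have hvmem : v ∈ S := (PySem.List.index?_isSome_iff S v).mp (by rw [hj]; rfl)
        have hxltv : x < v := lt_of_le_of_ne (hx v hvmem) hxv
        rw [List.countP_cons]
        have hih := ih hs' j' hj
        have hjj : j = j' + 1 := (Option.some.inj h).symm
        simp [hxltv, hjj, hih]

-- a fold of inserts whose value depends only on the key
theorem getD_foldl_insert_val (val : String → Int) (l : List String)
    (s : PySem.Dict String Int) (t : String) :
    (l.foldl (fun s a => s.insert a (val a)) s).getD t 0
      = if t ∈ l then val t else s.getD t 0 := by
  induction l generalizing s with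
  | nil => simp
  | cons a l ih =>
    simp only [List.foldl_cons]
    rw [ih]
    by_cases htl : t ∈ l
    · simp [htl]
    · rw [if_neg htl, PySem.Dict.getD_insert]
      by_cases hta : t = a
      · subst hta; simp
      · simp [hta, htl]

-- keys of B's give counter = the distinct parsed gift pairs
theorem keys_bGive (gs : List String)
    (hg : ∀ gi ∈ gs, ∃ a b, PySem.Str.split? gi " " = some [a, b])
    (g : PySem.Dict (String × String) Int) (p : String × String) :
    p ∈ (gs.foldl bGive g).keys ↔ p ∈ g.keys ∨ p ∈ pairsOf gs := by
  induction gs generalizing g with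
  | nil => simp [pairsOf]
  | cons gi t ih =>
    obtain ⟨a, b, hab⟩ := hg gi (by simp)
    have ht : ∀ g ∈ t, ∃ a b, PySem.Str.split? g " " = some [a, b] := fun g hgm => hg g (by simp [hgm])
    have hpairs : pairsOf (gi :: t) = (a, b) :: pairsOf t := by simp [pairsOf, hab]
    simp only [List.foldl_cons]
    have hb : bGive g gi = g.insert (a, b) (g.getD (a, b) 0 + 1) := by rw [bGive, hab]
    rw [hb, ih ht, hpairs]
    rw [PySem.Dict.mem_keys_insert]
    simp only [List.mem_cons]
    tauto

theorem nodup_keys_bGive (gs : List String) (g : PySem.Dict (String × String) Int)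
    (h : g.keys.Nodup) : (gs.foldl bGive g).keys.Nodup := by
  induction gs generalizing g with
  | nil => exact h
  | cons gi t ih =>
    simp only [List.foldl_cons]
    apply ih
    unfold bGive
    rcases hs : PySem.Str.split? gi " " with _ | l
    · exact h
    · rcases l with _ | ⟨a, _ | ⟨b, _ | r⟩⟩
      · exact h
      · exact h
      · exact PySem.Dict.nodup_keys_insert _ _ _ h
      · exact h

-- the correction loop never changes the key set (all touched names are keys already)
theorem keys_bCorrStep (give : PySem.Dict (String × String) Int) (net : PySem.Dict String Int)
    (s : PySem.Dict String Int) (p : String × String)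
    (h1 : p.1 ∈ s.keys) (h2 : p.2 ∈ s.keys) :
    (bCorrStep give net s p).keys = s.keys := by
  have hkm : ∀ (x : String) (f : Int → Int) (s' : PySem.Dict String Int),
      x ∈ s'.keys → (s'.modify x 0 f).keys = s'.keys := by
    intro x f s' hx
    rw [PySem.Dict.keys_modify, PySem.Dict.keys_insert_of_contains]
    exact (PySem.Dict.contains_iff_mem_keys s' x).mpr hx
  unfold bCorrStep
  dsimp only
  split
  · rfl
  · have hWmem : (if give.getD (p.1, p.2) 0 > give.getD (p.2, p.1) 0 then p.1 else p.2) ∈ s.keys := by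
      split <;> assumption
    generalize hWe : (if give.getD (p.1, p.2) 0 > give.getD (p.2, p.1) 0 then p.1 else p.2) = W at hWmem ⊢
    by_cases hc1 : net.getD p.1 0 > net.getD p.2 0
    · simp only [if_pos hc1]
      split
      · rw [hkm p.1 (fun x => x - 1) _ (by rw [hkm W (fun x => x + 1) s hWmem]; exact h1),
          hkm W (fun x => x + 1) s hWmem]
      · rfl
    · by_cases hc2 : net.getD p.2 0 > net.getD p.1 0
      · simp only [if_neg hc1, if_pos hc2]
        split
        · rw [hkm p.2 (fun x => x - 1) _ (by rw [hkm W (fun x => x + 1) s hWmem]; exact h2),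
            hkm W (fun x => x + 1) s hWmem]
        · rfl
      · simp only [if_neg hc1, if_neg hc2]
        split
        · exact hkm W (fun x => x + 1) s hWmem
        · rfl

theorem keys_bCorr_fold (give : PySem.Dict (String × String) Int) (net : PySem.Dict String Int)
    (K : List (String × String)) (s : PySem.Dict String Int)
    (hend : ∀ p ∈ K, p.1 ∈ s.keys ∧ p.2 ∈ s.keys) :
    (K.foldl (bCorrStep give net) s).keys = s.keys := by
  induction K generalizing s with
  | nil => rfl
  | cons p K ih =>
    simp only [List.foldl_cons]
    have hstep := keys_bCorrStep give net s p (hend p (by simp)).1 (hend p (by simp)).2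
    rw [ih _ (fun q hq => by rw [hstep]; exact hend q (by simp [hq])), hstep]

-- a disjoint nodup list folded through Set.add appends
theorem foldl_set_add (l : List String) (s : List String)
    (hdis : ∀ x ∈ l, x ∉ s) (hnd : l.Nodup) :
    l.foldl PySem.Set.add s = s ++ l := by
  induction l generalizing s with
  | nil => simp
  | cons a l ih =>
    simp only [List.foldl_cons]
    have ha : PySem.Set.add s a = s ++ [a] := by
      unfold PySem.Set.add PySem.Set.contains
      rw [if_neg (by simpa using hdis a (by simp))]
    rw [ha, ih (s ++ [a])
      (fun x hx hmem => by
        rcases List.mem_append.mp hmem with h | h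
        · exact hdis x (by simp [hx]) h
        · have : x = a := List.mem_singleton.mp h
          exact (List.nodup_cons.mp hnd).1 (this ▸ hx))
      (List.Nodup.of_cons hnd)]
    simp

-- corrF through the partner map
theorem corrF_eq_partner (gs : List String) (t : String) (p : String × String)
    (hne : p.1 ≠ p.2) :
    corrF gs t p = (match partner gs t p with
      | some b => delta gs t b
      | none => 0) := by
  unfold corrF partner delta
  by_cases hskip : Gc gs p.1 p.2 = Gc gs p.2 p.1 ∨ (Gc gs p.2 p.1 ≠ 0 ∧ p.2 < p.1)
  · rw [if_pos hskip, if_pos hskip]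
  · rw [if_neg hskip, if_neg hskip]
    have hgc : Gc gs p.1 p.2 ≠ Gc gs p.2 p.1 := fun e => hskip (Or.inl e)
    have hbt1 : (bt gs p.1 p.2 = true) ↔ Gc gs p.2 p.1 < Gc gs p.1 p.2 := by
      simp only [bt, Bool.or_eq_true, Bool.and_eq_true, decide_eq_true_eq, beq_iff_eq]
      constructor
      · rintro (h | ⟨h, -⟩)
        · exact h
        · exact absurd h hgc
      · exact Or.inl
    have hbt2 : (bt gs p.2 p.1 = true) ↔ Gc gs p.1 p.2 < Gc gs p.2 p.1 := by
      simp only [bt, Bool.or_eq_true, Bool.and_eq_true, decide_eq_true_eq, beq_iff_eq]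
      constructor
      · rintro (h | ⟨h, -⟩)
        · exact h
        · exact absurd h.symm hgc
      · exact Or.inl
    by_cases h1 : p.1 = t
    · rw [if_pos h1]
      subst h1
      dsimp only
      have hx : (if p.1 = (if Gc gs p.1 p.2 > Gc gs p.2 p.1 then p.1 else p.2) then (1 : Int) else 0)
          = (if bt gs p.1 p.2 = true then 1 else 0) := by
        by_cases hab : Gc gs p.1 p.2 > Gc gs p.2 p.1
        · rw [if_pos hab, if_pos rfl, if_pos (hbt1.mpr hab)]
        · rw [if_neg hab, if_neg hne, if_neg (fun h => hab (hbt1.mp h))]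
      have hy : (if (if Nc gs p.1 > Nc gs p.2 then some p.1
            else if Nc gs p.2 > Nc gs p.1 then some p.2 else none) = some p.1 then (1 : Int) else 0)
          = (if Nc gs p.2 < Nc gs p.1 then 1 else 0) := by
        by_cases hn : Nc gs p.1 > Nc gs p.2
        · rw [if_pos hn, if_pos rfl, if_pos hn]
        · rw [if_neg hn, if_neg hn]
          by_cases hn2 : Nc gs p.2 > Nc gs p.1
          · rw [if_pos hn2, if_neg (fun e => hne (Option.some.inj e).symm)]
          · rw [if_neg hn2, if_neg (by simp : ¬ ((none : Option String) = some p.1))]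
      rw [hx, hy]
    · rw [if_neg h1]
      by_cases h2 : p.2 = t
      · rw [if_pos h2]
        subst h2
        dsimp only
        have hx : (if p.2 = (if Gc gs p.1 p.2 > Gc gs p.2 p.1 then p.1 else p.2) then (1 : Int) else 0)
            = (if bt gs p.2 p.1 = true then 1 else 0) := by
          by_cases hab : Gc gs p.1 p.2 > Gc gs p.2 p.1
          · rw [if_pos hab, if_neg (fun e => hne e.symm), if_neg (fun h => by
              have := hbt2.mp h; omega)]
          · rw [if_neg hab, if_pos rfl,
              if_pos (hbt2.mpr (lt_of_le_of_ne (not_lt.mp hab) hgc))]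
        have hy : (if (if Nc gs p.1 > Nc gs p.2 then some p.1
              else if Nc gs p.2 > Nc gs p.1 then some p.2 else none) = some p.2 then (1 : Int) else 0)
            = (if Nc gs p.1 < Nc gs p.2 then 1 else 0) := by
          by_cases hn : Nc gs p.1 > Nc gs p.2
          · rw [if_pos hn, if_neg (fun e => hne (Option.some.inj e)), if_neg (by omega)]
          · rw [if_neg hn]
            by_cases hn2 : Nc gs p.2 > Nc gs p.1
            · rw [if_pos hn2, if_pos rfl, if_pos hn2]
            · rw [if_neg hn2, if_neg (by simp : ¬ ((none : Option String) = some p.2)),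
                if_neg hn2]
        rw [hx, hy]
      · rw [if_neg h2]
        dsimp only
        have hx : (if t = (if Gc gs p.1 p.2 > Gc gs p.2 p.1 then p.1 else p.2) then (1 : Int) else 0) = 0 := by
          by_cases hab : Gc gs p.1 p.2 > Gc gs p.2 p.1
          · rw [if_pos hab, if_neg (fun e => h1 e.symm)]
          · rw [if_neg hab, if_neg (fun e => h2 e.symm)]
        have hy : (if (if Nc gs p.1 > Nc gs p.2 then some p.1
              else if Nc gs p.2 > Nc gs p.1 then some p.2 else none) = some t then (1 : Int) else 0) = 0 := by
          by_cases hn : Nc gs p.1 > Nc gs p.2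
          · rw [if_pos hn, if_neg (fun e => h1 (Option.some.inj e))]
          · rw [if_neg hn]
            by_cases hn2 : Nc gs p.2 > Nc gs p.1
            · rw [if_pos hn2, if_neg (fun e => h2 (Option.some.inj e))]
            · rw [if_neg hn2, if_neg (by simp : ¬ ((none : Option String) = some t))]
        rw [hx, hy]
        simp

theorem sum_corr_filterMap (gs : List String) (t : String) (K : List (String × String))
    (hend : ∀ p ∈ K, p.1 ≠ p.2) :
    (K.map (corrF gs t)).sum = ((K.filterMap (partner gs t)).map (delta gs t)).sum := by
  induction K with
  | nil => rfl
  | cons p K ih =>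
    rw [List.map_cons, List.sum_cons, List.filterMap_cons,
      corrF_eq_partner gs t p (hend p (by simp))]
    have ih' := ih (fun q hq => hend q (by simp [hq]))
    cases hp : partner gs t p with
    | none => simp only [hp]; rw [ih']; simp
    | some b => simp only [hp]; rw [List.map_cons, List.sum_cons, ih']

-- characterisation of partner hits
theorem partner_eq_some_iff (gs : List String) (t : String) (p : String × String) (b : String) :
    partner gs t p = some b ↔
      ((Gc gs p.1 p.2 ≠ Gc gs p.2 p.1 ∧ (Gc gs p.2 p.1 = 0 ∨ ¬ p.2 < p.1)) ∧
       ((p.1 = t ∧ b = p.2) ∨ (p.1 ≠ t ∧ p.2 = t ∧ b = p.1))) := by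
  unfold partner
  by_cases hskip : Gc gs p.1 p.2 = Gc gs p.2 p.1 ∨ (Gc gs p.2 p.1 ≠ 0 ∧ p.2 < p.1)
  · rw [if_pos hskip]
    constructor
    · intro h; cases h
    · rintro ⟨⟨h1, h2⟩, -⟩
      exfalso
      rcases hskip with h | ⟨h3, h4⟩
      · exact h1 h
      · rcases h2 with h | h
        · exact h3 h
        · exact h h4
  · rw [if_neg hskip]
    push_neg at hskip
    obtain ⟨h1, h2⟩ := hskip
    have hside : Gc gs p.2 p.1 = 0 ∨ ¬ p.2 < p.1 := by
      by_cases hz : Gc gs p.2 p.1 = 0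
      · exact Or.inl hz
      · exact Or.inr (h2 hz)
    by_cases hp1 : p.1 = t
    · rw [if_pos hp1]
      simp only [Option.some.injEq]
      constructor
      · intro h; exact ⟨⟨h1, hside⟩, Or.inl ⟨hp1, h.symm⟩⟩
      · rintro ⟨-, ⟨-, hb⟩ | ⟨hc, -, -⟩⟩
        · exact hb.symm
        · exact absurd hp1 hc
    · rw [if_neg hp1]
      by_cases hp2 : p.2 = t
      · rw [if_pos hp2]
        simp only [Option.some.injEq]
        constructor
        · intro h; exact ⟨⟨h1, hside⟩, Or.inr ⟨hp1, hp2, h.symm⟩⟩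
        · rintro ⟨-, ⟨hc, -⟩ | ⟨-, -, hb⟩⟩
          · exact absurd hc hp1
          · exact hb.symm
      · rw [if_neg hp2]
        constructor
        · intro h; cases h
        · rintro ⟨-, ⟨hc, -⟩ | ⟨-, hc, -⟩⟩
          · exact absurd hc hp1
          · exact absurd hc hp2

theorem nodup_partner_filterMap (gs : List String) (t : String) (K : List (String × String))
    (hK : K.Nodup) (hGc : ∀ p ∈ K, Gc gs p.1 p.2 ≠ 0) :
    (K.filterMap (partner gs t)).Nodup := by
  induction K with
  | nil => simp
  | cons p K ih =>
    obtain ⟨hpK, hK'⟩ := List.nodup_cons.mp hK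
    rw [List.filterMap_cons]
    cases hp : partner gs t p with
    | none => exact ih hK' (fun q hq => hGc q (by simp [hq]))
    | some b =>
      rw [List.nodup_cons]
      refine ⟨?_, ih hK' (fun q hq => hGc q (by simp [hq]))⟩
      intro hbmem
      obtain ⟨q, hqK, hq⟩ := List.mem_filterMap.mp hbmem
      rw [partner_eq_some_iff] at hp hq
      obtain ⟨⟨hpgc, hpo⟩, hpcase⟩ := hp
      obtain ⟨⟨hqgc, hqo⟩, hqcase⟩ := hq
      have hGp : Gc gs p.1 p.2 ≠ 0 := hGc p (by simp)
      have hGq : Gc gs q.1 q.2 ≠ 0 := hGc q (by simp [hqK])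
      rcases hpcase with ⟨hp1, hpb⟩ | ⟨hp1, hp2, hpb⟩ <;>
        rcases hqcase with ⟨hq1, hqb⟩ | ⟨hq1, hq2, hqb⟩
      · have hpq : p = q := by
          apply Prod.ext
          · rw [hp1, hq1]
          · exact hpb.symm.trans hqb
        exact hpK (hpq ▸ hqK)
      · -- p = (t, b), q = (b, t): both orientations would be kept, impossible
        have hGtb : Gc gs t b ≠ 0 := by rw [hp1, ← hpb] at hGp; exact hGp
        have hGbt : Gc gs b t ≠ 0 := by rw [← hqb, hq2] at hGq; exact hGq
        have hnbt : ¬ b < t := by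
          rcases hpo with h | h
          · rw [← hpb, hp1] at h; exact absurd h hGbt
          · rw [← hpb, hp1] at h; exact h
        have hntb : ¬ t < b := by
          rcases hqo with h | h
          · rw [hq2, ← hqb] at h; exact absurd h hGtb
          · rw [hq2, ← hqb] at h; exact h
        have hbne : b ≠ t := fun e => hq1 (hqb.symm.trans e)
        rcases lt_or_gt_of_ne hbne with h | h
        · exact hnbt h
        · exact hntb h
      · -- p = (b, t), q = (t, b): symmetric
        have hGbt : Gc gs b t ≠ 0 := by rw [← hpb, hp2] at hGp; exact hGp
        have hGtb : Gc gs t b ≠ 0 := by rw [hq1, ← hqb] at hGq; exact hGq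
        have hntb : ¬ t < b := by
          rcases hpo with h | h
          · rw [hp2, ← hpb] at h; exact absurd h hGtb
          · rw [hp2, ← hpb] at h; exact h
        have hnbt : ¬ b < t := by
          rcases hqo with h | h
          · rw [← hqb, hq1] at h; exact absurd h hGbt
          · rw [← hqb, hq1] at h; exact h
        have hbne : b ≠ t := fun e => hp1 (hpb.symm.trans e)
        rcases lt_or_gt_of_ne hbne with h | h
        · exact hnbt h
        · exact hntb h
      · have hpq : p = q := by
          apply Prod.ext
          · exact hpb.symm.trans hqb
          · rw [hp2, hq2]
        exact hpK (hpq ▸ hqK)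

theorem mem_partner_filterMap_iff (gs : List String) (fr : List String) (t : String)
    (K : List (String × String))
    (hmem : ∀ x y, (x, y) ∈ K ↔ Gc gs x y ≠ 0)
    (hfr : ∀ p ∈ K, p.1 ∈ fr ∧ p.2 ∈ fr ∧ p.1 ≠ p.2) (b : String) :
    b ∈ K.filterMap (partner gs t) ↔ (b ∈ fr ∧ b ≠ t ∧ Gc gs t b ≠ Gc gs b t) := by
  rw [List.mem_filterMap]
  constructor
  · rintro ⟨p, hpK, hp⟩
    rw [partner_eq_some_iff] at hp
    obtain ⟨⟨hgc, -⟩, hcase⟩ := hp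
    obtain ⟨h1, h2, h3⟩ := hfr p hpK
    rcases hcase with ⟨hp1, hpb⟩ | ⟨-, hp2, hpb⟩
    · subst hpb
      refine ⟨h2, fun e => h3 (hp1.trans e.symm), ?_⟩
      rw [← hp1]; exact hgc
    · subst hpb
      refine ⟨h1, fun e => h3 (e.trans hp2.symm), ?_⟩
      rw [← hp2]; exact fun e => hgc e.symm
  · rintro ⟨hbf, hbt, hgc⟩
    have htb : t ≠ b := fun e => hbt e.symm
    by_cases h1 : Gc gs t b = 0
    · -- then Gc b t ≠ 0 and key (b, t) is kept
      have h2 : Gc gs b t ≠ 0 := fun h => hgc (h1.trans h.symm)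
      refine ⟨(b, t), (hmem b t).mpr h2, ?_⟩
      rw [partner_eq_some_iff]
      exact ⟨⟨fun e => hgc e.symm, Or.inl h1⟩, Or.inr ⟨hbt, rfl, rfl⟩⟩
    · by_cases h2 : Gc gs b t = 0
      · refine ⟨(t, b), (hmem t b).mpr h1, ?_⟩
        rw [partner_eq_some_iff]
        exact ⟨⟨hgc, Or.inl h2⟩, Or.inl ⟨rfl, rfl⟩⟩
      · rcases lt_or_gt_of_ne htb with hlt | hgt
        · refine ⟨(t, b), (hmem t b).mpr h1, ?_⟩
          rw [partner_eq_some_iff]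
          exact ⟨⟨hgc, Or.inr (lt_asymm hlt)⟩, Or.inl ⟨rfl, rfl⟩⟩
        · refine ⟨(b, t), (hmem b t).mpr h2, ?_⟩
          rw [partner_eq_some_iff]
          exact ⟨⟨fun e => hgc e.symm, Or.inr (lt_asymm hgt)⟩, Or.inr ⟨hbt, rfl, rfl⟩⟩

-- summing delta over the asymmetric opponents gives wins minus baseline
theorem sum_delta_filter (gs : List String) (t : String) (l : List String) :
    ((l.filter (fun b => b != t && decide (Gc gs t b ≠ Gc gs b t))).map (delta gs t)).sum
      = wins gs t l - (l.countP (fun b => decide (Nc gs b < Nc gs t)) : Int) := by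
  induction l with
  | nil => simp [wins]
  | cons b l ih =>
    rw [List.filter_cons, List.countP_cons]
    have hw : wins gs t (b :: l)
        = (if (b != t && bt gs t b) = true then 1 else 0) + wins gs t l := by
      unfold wins
      rw [List.filter_cons]
      by_cases h : (b != t && bt gs t b) = true <;> simp [h] <;> push_cast <;> ring
    by_cases hbt : b = t
    · subst hbt
      rw [if_neg (by simp : ¬ ((b != b && decide (Gc gs b b ≠ Gc gs b b)) = true)), ih, hw]
      simp [lt_irrefl]
    · by_cases hgc : Gc gs t b ≠ Gc gs b t
      · have hcond : (b != t && decide (Gc gs t b ≠ Gc gs b t)) = true := by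
          simp [hbt, hgc]
        rw [if_pos hcond, List.map_cons, List.sum_cons, ih, hw]
        unfold delta
        by_cases hb2 : bt gs t b = true <;> by_cases hnc : Nc gs b < Nc gs t <;>
          simp [hbt, hb2, hnc] <;> push_cast <;> omega
      · push_neg at hgc
        have hcond : (b != t && decide (Gc gs t b ≠ Gc gs b t)) = false := by
          simp [hgc]
        have hbtv : bt gs t b = decide (Nc gs b < Nc gs t) := by
          simp [bt, hgc, lt_irrefl]
        rw [if_neg (ne_true_of_eq_false hcond), ih, hw, hbtv]
        by_cases hnc : Nc gs b < Nc gs t <;> simp [hbt, hnc] <;> push_cast <;> omega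

-- with no gifts nobody beats anybody
theorem wins_gifts_nil (t : String) (l : List String) : wins [] t l = 0 := by
  have hb : ∀ y, (y != t && bt [] t y) = false := by
    intro y
    simp [bt, Gc, Nc, pairsOf]
  unfold wins
  simp [hb]

-- B computes the running max of per-friend win counts
theorem alt_eq_foldmax (fr gs : List String) (hnd : fr.Nodup)
    (hg : ∀ gi ∈ gs, ∃ a b, PySem.Str.split? gi " " = some [a, b])
    (hp : ∀ p ∈ pairsOf gs, p.1 ∈ fr ∧ p.2 ∈ fr ∧ p.1 ≠ p.2) :
    solution_alt fr gs = fr.foldl (fun m t => max m (wins gs t fr)) 0 := by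
  simp only [solution_alt, bFold_eq]
  set net := gs.foldl bNet (fr.foldl (fun n a => n.insert a (0 : Int)) PySem.Dict.empty) with hnetdef
  set give := gs.foldl bGive (PySem.Dict.empty : PySem.Dict (String × String) Int) with hgivedef
  have hNet : ∀ x, net.getD x 0 = Nc gs x := by
    intro x
    rw [hnetdef, bNet_getD gs hg _ x,
      net0_getD fr PySem.Dict.empty (fun y => PySem.Dict.getD_empty y 0) x]
    unfold Nc
    ring
  have hGive : ∀ x y, give.getD (x, y) 0 = Gc gs x y := by
    intro x y
    rw [hgivedef, bGive_getD gs hg _ x y, PySem.Dict.getD_empty]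
    unfold Gc
    ring
  have hmapnet : fr.map (fun a => net.getD a 0) = fr.map (Nc gs) :=
    List.map_congr_left (fun a _ => hNet a)
  rw [hmapnet]
  -- below-table values
  have hbelow : ∀ v ∈ fr.map (Nc gs),
      (bBelow (PySem.List.sorted (fr.map (Nc gs)) (fun v => v) false)).getD v 0
        = ((fr.map (Nc gs)).countP (fun u => decide (u < v)) : Int) := by
    intro v hv
    have hvS : v ∈ PySem.List.sorted (fr.map (Nc gs)) (fun v => v) false := by
      rw [PySem.List.mem_sorted]; exact hv
    have hsome : (PySem.List.index? (PySem.List.sorted (fr.map (Nc gs)) (fun v => v) false) v).isSome :=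
      (PySem.List.index?_isSome_iff _ v).mpr hvS
    cases hidx : PySem.List.index? (PySem.List.sorted (fr.map (Nc gs)) (fun v => v) false) v with
    | none => rw [hidx] at hsome; simp at hsome
    | some j =>
      have hpw : (PySem.List.sorted (fr.map (Nc gs)) (fun v => v) false).Pairwise (· ≤ ·) := by
        simpa using PySem.List.sorted_pairwise (fr.map (Nc gs)) (fun v => v)
      have hj := index?_sorted_countP _ hpw v j hidx
      unfold bBelow
      rw [PySem.Dict.getD_eq_get?_getD, below_get? _ 0 PySem.Dict.empty v,
        PySem.Dict.get?_empty, hidx]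
      have hperm := PySem.List.sorted_perm (fr.map (Nc gs)) (fun v => v) false
      rw [← hperm.countP_eq, ← hj]
      simp
  -- baseline score
  set score0 := fr.foldl (fun s a => s.insert a
      ((bBelow (PySem.List.sorted (fr.map (Nc gs)) (fun v => v) false)).getD (net.getD a 0) 0))
    PySem.Dict.empty with hscore0def
  have hscore0 : ∀ t ∈ fr, score0.getD t 0
      = (fr.countP (fun b => decide (Nc gs b < Nc gs t)) : Int) := by
    intro t ht
    rw [hscore0def, getD_foldl_insert_val _ fr PySem.Dict.empty t, if_pos ht, hNet t,
      hbelow (Nc gs t) (List.mem_map.mpr ⟨t, ht, rfl⟩), List.countP_map]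
    rfl
  -- key-set facts
  have hkeysiff : ∀ p : String × String, p ∈ give.keys ↔ p ∈ pairsOf gs := by
    intro p
    rw [hgivedef, keys_bGive gs hg]
    simp [PySem.Dict.keys_empty]
  have hKmem : ∀ x y, (x, y) ∈ give.keys ↔ Gc gs x y ≠ 0 := by
    intro x y
    rw [hkeysiff (x, y)]
    unfold Gc
    rw [ne_eq, Int.natCast_eq_zero, List.count_eq_zero]
    exact not_not.symm
  have hKfr : ∀ p ∈ give.keys, p.1 ∈ fr ∧ p.2 ∈ fr ∧ p.1 ≠ p.2 :=
    fun p hpK => hp p ((hkeysiff p).mp hpK)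
  have hKnd : give.keys.Nodup := by
    rw [hgivedef]
    exact nodup_keys_bGive gs _ PySem.Dict.nodup_keys_empty
  -- the corrected scores are the win counts
  set score := give.keys.foldl (bCorrStep give net) score0 with hscoredef
  have hscoreval : ∀ t ∈ fr, score.getD t 0 = wins gs t fr := by
    intro t ht
    rw [hscoredef, bCorr_fold_getD gs give net hGive hNet, hscore0 t ht,
      sum_corr_filterMap gs t give.keys (fun p hp' => (hKfr p hp').2.2)]
    have hPt : (give.keys.filterMap (partner gs t)).Perm
        (fr.filter (fun b => b != t && decide (Gc gs t b ≠ Gc gs b t))) := by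
      rw [List.perm_ext_iff_of_nodup
        (nodup_partner_filterMap gs t give.keys hKnd
          (fun p hp' => (hKmem p.1 p.2).mp hp'))
        (hnd.filter _)]
      intro b
      rw [mem_partner_filterMap_iff gs fr t give.keys hKmem hKfr b, List.mem_filter]
      constructor
      · rintro ⟨h1, h2, h3⟩
        exact ⟨h1, by simp [h2, h3]⟩
      · rintro ⟨h1, h2⟩
        simp at h2
        exact ⟨h1, h2.1, h2.2⟩
    rw [(hPt.map (delta gs t)).sum_eq, sum_delta_filter gs t fr]
    ring
  -- keys of the score dicts
  have hscore0keys : score0.keys = fr := by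
    rw [hscore0def, PySem.Dict.keys_foldl_insert]
    have : (PySem.Dict.empty : PySem.Dict String Int).keys = [] := PySem.Dict.keys_empty
    rw [this]
    exact foldl_set_add fr [] (by simp) hnd
  have hscorekeys : score.keys = fr := by
    rw [hscoredef, keys_bCorr_fold give net give.keys score0
      (fun p hp' => ⟨by rw [hscore0keys]; exact (hKfr p hp').1,
                     by rw [hscore0keys]; exact (hKfr p hp').2.1⟩), hscore0keys]
  have hvals : score.values = fr.map (fun t => wins gs t fr) := by
    rw [PySem.Dict.values_eq_map_keys score (by rw [hscorekeys]; exact hnd) 0, hscorekeys]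
    exact List.map_congr_left (fun t ht => hscoreval t ht)
  rw [hvals]
  clear_value score score0 net give
  cases fr with
  | nil =>
    rw [List.map_nil, show PySem.List.max? ([] : List Int) (fun v => v) = none from
      (PySem.List.max?_eq_none_iff _ _).mpr rfl]
    rfl
  | cons f fr' =>
    rw [List.map_cons, PySem.List.max?_id_cons]
    show (fr'.map (fun t => wins gs t (f :: fr'))).foldl max (wins gs f (f :: fr')) = _
    have hR : (f :: fr').foldl (fun m t => max m (wins gs t (f :: fr'))) 0
        = ((f :: fr').map (fun t => wins gs t (f :: fr'))).foldl max 0 := List.foldl_map.symm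
    rw [hR, List.map_cons, List.foldl_cons]
    have h0 : max (0 : Int) (wins gs f (f :: fr')) = wins gs f (f :: fr') :=
      max_eq_right (Int.natCast_nonneg _)
    rw [h0]

theorem solution_spec : Claim_equal_solution := by
  intro fr gs _ hpre
  obtain ⟨hnd, hgift, hrest⟩ := hpre
  have hg : ∀ gi ∈ gs, ∃ a b, PySem.Str.split? gi " " = some [a, b] := by
    intro gi hgi
    obtain ⟨a, b, hab, _⟩ := giftOK_spec fr gi (hgift gi hgi)
    exact ⟨a, b, hab⟩
  have hp : ∀ p ∈ pairsOf gs, p.1 ∈ fr ∧ p.2 ∈ fr ∧ p.1 ≠ p.2 := by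
    intro p hpm
    obtain ⟨gi, hgi, hpe⟩ := List.mem_map.mp hpm
    obtain ⟨a, b, hab, ha, hb, hne⟩ := giftOK_spec fr gi (hgift gi hgi)
    rw [hab] at hpe
    rw [← hpe]
    exact ⟨ha, hb, hne⟩
  have hB := alt_eq_foldmax fr gs hnd hg hp
  rcases hrest with rfl | ⟨hsum, hcnt⟩
  · rw [Spec_solution, solution_nil, hB]
    exact (foldmax_zero fr _ (fun t _ => wins_gifts_nil t fr)).symm
  · set dG := gs.foldl aGiftStep (aInit fr) with hdG
    have hz := allZero_aInit fr
    have hSlotG : ∀ x ∈ fr, ∀ y ∈ fr, y ≠ x →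
        (dG.getD x PySem.Dict.empty).getD y 0 = Gc gs x y := by
      intro x hx y hy hyx
      rw [hdG, giftFold_slot gs hg _ x y, hz x y,
        if_neg (fun h => hsum (by rw [← h]; exact hy)), countP_pair]
      simp [Gc]
    have hSumG : ∀ x ∈ fr, (dG.getD x PySem.Dict.empty).getD "sum" 0 = Nc gs x := by
      intro x hx
      rw [hdG, giftFold_slot gs hg _ x "sum", hz x "sum", if_pos rfl]
      have h0 : (pairsOf gs).countP (fun p => p.1 == x && p.2 == "sum") = 0 := by
        rw [List.countP_eq_zero]
        intro p hpm
        have := (hp p hpm).2.1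
        simp only [Bool.and_eq_true, beq_iff_eq]
        rintro ⟨-, h2⟩
        exact hsum (h2 ▸ this)
      rw [h0]
      simp [Nc]
    have hcnt0 : ∀ t, cntd dG t = 0 := by
      intro t
      unfold cntd
      rw [hdG, giftFold_slot gs hg _ t "cnt", hz t "cnt", if_neg (by decide)]
      have h0 : (pairsOf gs).countP (fun p => p.1 == t && p.2 == "cnt") = 0 := by
        rw [List.countP_eq_zero]
        intro p hpm
        have := (hp p hpm).2.1
        simp only [Bool.and_eq_true, beq_iff_eq]
        rintro ⟨-, h2⟩
        exact hcnt (h2 ▸ this)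
      rw [h0]
      simp
    obtain ⟨-, fC, fM⟩ := outer_loop gs fr dG hSlotG hSumG hcnt hsum hnd hcnt0
      fr.length (le_refl _)
    have hA : solution fr gs
        = fr.foldl (fun m t => max m (wins gs t fr)) 0 := by
      have hAe : solution fr gs = ((PySem.List.pyRange 0 (fr.length : Int) 1).foldl
          (fun st i => (PySem.List.pyRange (i + 1) (fr.length : Int) 1).foldl
            (fun st j => aPairStep fr st i j) st) (dG, 0)).2 := rfl
      rw [hAe, fM]
      apply foldmax_congr
      intro t ht
      rw [fC t ht, if_pos (by rw [List.take_length]; exact ht)]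
    rw [Spec_solution, hA, hB]
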